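-- pv_equiv track=rewrite | github.com/pbert5/lysozyme-stain-quantification | src/manual_verification_tool/visual_inspector.py | _extract_image_name
-- ===== SOURCE A (Python) =====
-- def _extract_image_name(filename):
--     """Extract clean image name from visualization filename."""
--     cleaned = filename
--     suffixes = [
--         '_RFP_detected_regions.png',
--         '_detected_regions.png',
--         '_crypt_overlay.png',
--         '_overlay.png',
--         '.png'
--     ]
--     for suffix in suffixes:
--         if cleaned.endswith(suffix):
--             cleaned = cleaned[:-len(suffix)]
--             break
--     return cleaned
-- ===== SOURCE B (Python) =====
-- SUFFIXES = [
--     '_RFP_detected_regions.png',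
--     '_detected_regions.png',
--     '_crypt_overlay.png',
--     '_overlay.png',
--     '.png'
-- ]
--
--
-- def _extract_image_name(filename):
--     """Strip the longest known visualization suffix: filter all matches, cut the longest."""
--     matched = [len(s) for s in SUFFIXES if filename.endswith(s)]
--     return filename[:-max(matched)] if matched else filename
-- ===== Notes on version B (the rewrite author's own statement) =====
-- stated objective: simpler
-- what changed: A scans the suffix list in priority order and strips the first match with a break; B is order-independent: it collects the lengths of ALL matching suffixes in one comprehension and cuts the maximum, relying on the fact that the known suffix lengths are distinct and mutual-suffix structure makes longest = first-in-A's-order.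
import Mathlib
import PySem

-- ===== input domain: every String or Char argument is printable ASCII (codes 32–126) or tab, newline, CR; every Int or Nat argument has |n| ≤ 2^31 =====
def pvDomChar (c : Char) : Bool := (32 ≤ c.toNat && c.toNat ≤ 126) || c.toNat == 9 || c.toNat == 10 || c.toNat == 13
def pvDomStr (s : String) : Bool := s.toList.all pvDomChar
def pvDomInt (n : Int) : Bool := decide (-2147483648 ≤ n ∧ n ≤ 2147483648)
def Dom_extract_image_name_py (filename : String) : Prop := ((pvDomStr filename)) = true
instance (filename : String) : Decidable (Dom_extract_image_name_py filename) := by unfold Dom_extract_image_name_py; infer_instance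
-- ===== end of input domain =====

-- B replaces A's ordered first-match-and-break scan by an order-independent
-- filter-all-matches + cut-the-longest formulation (objective: simpler).

-- ===== PORT A =====
-- A's local 'suffixes' list
def pvSuffixesA : List String :=
  ["_RFP_detected_regions.png", "_detected_regions.png", "_crypt_overlay.png",
   "_overlay.png", ".png"]

-- A's 'for suffix in suffixes: if cleaned.endswith(suffix): cleaned = cleaned[:-len(suffix)]; break'
def pvLoopA : List String → String → String
  | [], cleaned => cleaned
  | suffix :: rest, cleaned =>
      if PySem.Str.endswith cleaned suffix then
        PySem.Str.slice cleaned none (some (-(PySem.Str.len suffix : Int)))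
      else
        pvLoopA rest cleaned

def extract_image_name_py (filename : String) : String :=
  pvLoopA pvSuffixesA filename

-- ===== PORT B =====
-- B's module-level SUFFIXES
def pvSuffixesB : List String :=
  ["_RFP_detected_regions.png", "_detected_regions.png", "_crypt_overlay.png",
   "_overlay.png", ".png"]

-- matched = [len(s) for s in SUFFIXES if filename.endswith(s)]
-- return filename[:-max(matched)] if matched else filename
def extract_image_name_py_alt (filename : String) : String :=
  let matched : List Int :=
    (pvSuffixesB.filter (fun s => PySem.Str.endswith filename s)).map
      (fun s => PySem.Str.len s)
  match PySem.List.max? matched (fun x => x) with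
  | some m => PySem.Str.slice filename none (some (-m))
  | none => filename

-- ===== PRECONDITION & SPEC =====
def Spec_extract_image_name_py (filename : String) (out : String) : Prop := out = extract_image_name_py_alt filename
instance (filename : String) (out : String) : Decidable (Spec_extract_image_name_py filename out) := by unfold Spec_extract_image_name_py; infer_instance

-- ===== CLAIM (what is proved, stated in full; the proofs are below) =====
def Claim_equal_extract_image_name_py : Prop := ∀ (filename : String), Dom_extract_image_name_py filename → Spec_extract_image_name_py filename (extract_image_name_py filename)

-- ===== LEMMAS AND PROOFS =====

-- endswith is monotone in a suffix of the pattern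
theorem pv_ew_mono (s : String) (p q : String) (h : q.toList <:+ p.toList)
    (hp : PySem.Str.endswith s p = true) : PySem.Str.endswith s q = true := by
  simp only [PySem.Str.endswith_eq] at *
  rw [PySem.Chars.endswith_iff] at *
  exact h.trans hp

-- two matching suffixes of the same string: one is a suffix of the other
theorem pv_ew_excl (s : String) (p q : String)
    (hpq : ¬ p.toList <:+ q.toList) (hqp : ¬ q.toList <:+ p.toList)
    (hp : PySem.Str.endswith s p = true) : PySem.Str.endswith s q = false := by
  by_contra h
  rw [Bool.not_eq_false] at h
  simp only [PySem.Str.endswith_eq, PySem.Chars.endswith_iff] at hp h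
  rcases List.suffix_or_suffix_of_suffix hp h with h' | h'
  · exact hpq h'
  · exact hqp h'

-- ===== VERDICT (by name: the statement is the Claim_ definition above) =====
theorem extract_image_name_py_spec : Claim_equal_extract_image_name_py := by
  intro filename _
  unfold Spec_extract_image_name_py extract_image_name_py extract_image_name_py_alt
  unfold pvSuffixesA pvSuffixesB
  cases h5 : PySem.Str.endswith filename ".png" with
  | false =>
    have h1 : PySem.Str.endswith filename "_RFP_detected_regions.png" = false := by
      by_contra h; rw [Bool.not_eq_false] at h
      have hx := pv_ew_mono filename _ ".png" (by decide) h; rw [h5] at hx; exact Bool.noConfusion hx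
    have h2 : PySem.Str.endswith filename "_detected_regions.png" = false := by
      by_contra h; rw [Bool.not_eq_false] at h
      have hx := pv_ew_mono filename _ ".png" (by decide) h; rw [h5] at hx; exact Bool.noConfusion hx
    have h3 : PySem.Str.endswith filename "_crypt_overlay.png" = false := by
      by_contra h; rw [Bool.not_eq_false] at h
      have hx := pv_ew_mono filename _ ".png" (by decide) h; rw [h5] at hx; exact Bool.noConfusion hx
    have h4 : PySem.Str.endswith filename "_overlay.png" = false := by
      by_contra h; rw [Bool.not_eq_false] at h
      have hx := pv_ew_mono filename _ ".png" (by decide) h; rw [h5] at hx; exact Bool.noConfusion hx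
    simp at h1 h2 h3 h4 h5
    simp [pvLoopA, h1, h2, h3, h4, h5, PySem.List.max?]
  | true =>
    cases h1 : PySem.Str.endswith filename "_RFP_detected_regions.png" with
    | true =>
      have h2 := pv_ew_mono filename "_RFP_detected_regions.png" "_detected_regions.png" (by decide) h1
      have h3 := pv_ew_excl filename "_RFP_detected_regions.png" "_crypt_overlay.png" (by decide) (by decide) h1
      have h4 := pv_ew_excl filename "_RFP_detected_regions.png" "_overlay.png" (by decide) (by decide) h1
      simp at h1 h2 h3 h4 h5
      simp [pvLoopA, h1, h2, h3, h4, h5, PySem.List.max?, PySem.Str.len_eq]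
      rfl
    | false =>
      cases h2 : PySem.Str.endswith filename "_detected_regions.png" with
      | true =>
        have h3 := pv_ew_excl filename "_detected_regions.png" "_crypt_overlay.png" (by decide) (by decide) h2
        have h4 := pv_ew_excl filename "_detected_regions.png" "_overlay.png" (by decide) (by decide) h2
        simp at h1 h2 h3 h4 h5
        simp [pvLoopA, h1, h2, h3, h4, h5, PySem.List.max?, PySem.Str.len_eq]
        rfl
      | false =>
        cases h3 : PySem.Str.endswith filename "_crypt_overlay.png" with
        | true =>
          have h4 := pv_ew_mono filename "_crypt_overlay.png" "_overlay.png" (by decide) h3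
          simp at h1 h2 h3 h4 h5
          simp [pvLoopA, h1, h2, h3, h4, h5, PySem.List.max?, PySem.Str.len_eq]
          rfl
        | false =>
          cases h4 : PySem.Str.endswith filename "_overlay.png" with
          | true =>
            simp at h1 h2 h3 h4 h5
            simp [pvLoopA, h1, h2, h3, h4, h5, PySem.List.max?, PySem.Str.len_eq]
            rfl
          | false =>
            simp at h1 h2 h3 h4 h5
            simp [pvLoopA, h1, h2, h3, h4, h5, PySem.List.max?, PySem.Str.len_eq]
            rfl
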